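-- pv_equiv track=rewrite | github.com/MarkVanDerVoort/pfnetwork | 005_create_lists.py | return_ranking_dict
-- ===== SOURCE A (Python) =====
-- import itertools, operator
--
-- def return_ranking_dict(d):
--     """
--     Returns a dictionary with ranks as value based on another dictionary's values.
--     """
--     res = {}
--     prev = None
--     sorted_d = sorted(d.items(), key=operator.itemgetter(1), reverse=True)
--     for i, (node,v) in enumerate(sorted_d):
--         if v != prev:
--             rank, prev = i + 1, v
--         res[node] = rank
--     return res
-- ===== SOURCE B (Python) =====
-- import operator
--
-- def return_ranking_dict(d):
--     """
--     Returns a dictionary with ranks as value based on another dictionary's values.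
--     """
--     sd = sorted(d.items(), key=operator.itemgetter(1), reverse=True)
--     vals = [v for _, v in sd]
--     return {node: 1 + sum(1 for w in vals if w > v) for node, v in sd}
-- ===== Notes on version B (the rewrite author's own statement) =====
-- stated objective: alternative
-- what changed: B assigns each node its rank directly as 1 plus the count of strictly greater values (stateless competition ranking over the sorted items), replacing A's enumerate loop that threads prev/rank state between iterations.
import Mathlib
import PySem

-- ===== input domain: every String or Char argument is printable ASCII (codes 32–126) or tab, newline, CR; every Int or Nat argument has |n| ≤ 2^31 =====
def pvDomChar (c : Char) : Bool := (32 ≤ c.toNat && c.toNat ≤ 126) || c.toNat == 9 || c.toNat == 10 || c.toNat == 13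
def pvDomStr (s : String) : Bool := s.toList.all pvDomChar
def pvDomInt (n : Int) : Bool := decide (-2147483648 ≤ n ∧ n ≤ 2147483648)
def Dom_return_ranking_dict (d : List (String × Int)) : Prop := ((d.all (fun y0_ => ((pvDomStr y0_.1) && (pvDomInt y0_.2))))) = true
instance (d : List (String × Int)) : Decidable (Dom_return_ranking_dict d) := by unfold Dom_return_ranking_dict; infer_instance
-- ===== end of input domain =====

-- B replaces A's enumerate/prev/rank stateful scan by a stateless per-element
-- count of strictly greater values (competition ranking); objective: alternative.

-- ===== PORT A =====
def return_ranking_dict (d : List (String × Int)) : List (String × Int) :=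
  let sorted_d := PySem.List.sorted d (fun p => p.2) true
  let st := (PySem.List.enumerate sorted_d 0).foldl
    (fun (st : PySem.Dict String Int × Int × Option Int) iv =>
      let res := st.1
      let i := iv.1; let node := iv.2.1; let v := iv.2.2
      -- 'if v != prev: rank, prev = i + 1, v' (prev starts as None; rank starts unbound,
      -- modelled as 0 — it is always set before first use since v != None)
      let rp := if some v ≠ st.2.2 then (i + 1, some v) else st.2
      (res.insert node rp.1, rp))
    (PySem.Dict.empty, 0, none)
  st.1.items

-- ===== PORT B =====
def return_ranking_dict_alt (d : List (String × Int)) : List (String × Int) :=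
  let sd := PySem.List.sorted d (fun p => p.2) true
  let vals := sd.map (fun p => p.2)
  sd.map (fun p => (p.1, 1 + (vals.map (fun w => if w > p.2 then (1 : Int) else 0)).sum))

-- ===== PRECONDITION & SPEC =====
-- d stands for a Python dict, whose keys are necessarily distinct; Pre_ states just that
-- (on a list with duplicate keys neither program models any Python input).
def Pre_return_ranking_dict (d : List (String × Int)) : Prop := (d.map Prod.fst).Nodup
instance (d : List (String × Int)) : Decidable (Pre_return_ranking_dict d) := by unfold Pre_return_ranking_dict; infer_instance
def pvWitness_return_ranking_dict : (List (String × Int)) := [("a", 2), ("b", 1), ("c", 2)]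

def Spec_return_ranking_dict (d : List (String × Int)) (out : List (String × Int)) : Prop := out = return_ranking_dict_alt d
instance (d : List (String × Int)) (out : List (String × Int)) : Decidable (Spec_return_ranking_dict d out) := by unfold Spec_return_ranking_dict; infer_instance

-- ===== CLAIM (what is proved, stated in full; the proofs are below) =====
def Claim_equal_return_ranking_dict : Prop := ∀ (d : List (String × Int)), Dom_return_ranking_dict d → Pre_return_ranking_dict d → Spec_return_ranking_dict d (return_ranking_dict d)

-- ===== LEMMAS AND PROOFS =====

-- Invariant of A's enumerate/prev/rank loop over the descending-sorted list s:
-- after processing 'done', res.items lists done with competition ranks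
-- 1 + #(strictly greater values in s), prev is the last value seen and rank its rank.
theorem rank_fold_items
    (s : List (String × Int))
    (hp : s.Pairwise (fun a b => b.2 ≤ a.2))
    (hn : (s.map Prod.fst).Nodup) :
    ∀ (t done : List (String × Int)) (res : PySem.Dict String Int) (rank : Int) (prev : Option Int),
      s = done ++ t →
      res.items = done.map (fun p => (p.1, 1 + (s.countP (fun q => decide (p.2 < q.2)) : Int))) →
      ((done = [] ∧ prev = none) ∨
        (∃ lv, prev = some lv ∧ rank = 1 + (s.countP (fun q => decide (lv < q.2)) : Int)
          ∧ (∀ p ∈ done, lv ≤ p.2) ∧ (∀ q ∈ t, q.2 ≤ lv))) →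
      ((PySem.List.enumerate t (done.length : Int)).foldl
        (fun (st : PySem.Dict String Int × Int × Option Int) iv =>
          let res := st.1
          let rp := if some iv.2.2 ≠ st.2.2 then (iv.1 + 1, some iv.2.2) else st.2
          (res.insert iv.2.1 rp.1, rp))
        (res, rank, prev)).1.items
      = s.map (fun p => (p.1, 1 + (s.countP (fun q => decide (p.2 < q.2)) : Int))) := by
  intro t
  induction t with
  | nil =>
    intro done res rank prev hs hres _
    simp [PySem.List.enumerate] at *
    simpa [hs] using hres
  | cons x t' ih =>
    intro done res rank prev hs hres hinv
    rw [PySem.List.enumerate_cons]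
    rw [List.foldl_cons]
    -- facts from pairwise
    have hsplit := hp
    rw [hs, List.pairwise_append] at hsplit
    obtain ⟨hpd, hpt, hcross⟩ := hsplit
    have ht' : ∀ q ∈ t', q.2 ≤ x.2 := by
      have := (List.pairwise_cons.mp hpt).1
      exact this
    -- key freshness
    have hx1 : x.1 ∉ done.map Prod.fst := by
      have hn' := hn
      rw [hs, List.map_append, List.map_cons] at hn'
      exact fun hmem => (List.nodup_append.mp hn').2.2 x.1 hmem x.1 List.mem_cons_self rfl
    have hkeys : res.keys = done.map Prod.fst := by
      simp only [PySem.Dict.keys, hres, List.map_map]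
      rfl
    have hcont : res.contains x.1 = false := by
      rw [PySem.Dict.contains_eq_decide_mem_keys, hkeys]
      simpa using hx1
    -- rank value for x
    have hrankval : ∀ hne : some x.2 ≠ prev,
        (s.countP (fun q => decide (x.2 < q.2))) = done.length := by
      intro hne
      rw [hs, List.countP_append]
      have h1 : List.countP (fun q => decide (x.2 < q.2)) (x :: t') = 0 := by
        rw [List.countP_eq_zero]
        intro a ha
        rcases List.mem_cons.mp ha with h | h
        · subst h; simp
        · simpa using not_lt.mpr (ht' a h)
      have h2 : List.countP (fun q => decide (x.2 < q.2)) done = done.length := by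
        rw [List.countP_eq_length]
        intro p hpmem
        rcases hinv with ⟨hd, _⟩ | ⟨lv, hprev, _, hmin, hub⟩
        · subst hd; simp at hpmem
        · have hxle : x.2 ≤ lv := hub x (List.mem_cons_self)
          have hneq : x.2 ≠ lv := by
            intro h; exact hne (by rw [h, hprev])
          have : x.2 < lv := lt_of_le_of_ne hxle hneq
          simpa using lt_of_lt_of_le this (hmin p hpmem)
      omega
    -- apply IH with done' = done ++ [x]
    have hlen : (done.length : Int) + 1 = ((done ++ [x]).length : Int) := by
      simp
    by_cases hne : some x.2 ≠ prev
    · simp only [if_pos hne]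
      have hcnt := hrankval hne
      have hstep := ih (done ++ [x]) (res.insert x.1 ((done.length : Int) + 1))
        ((done.length : Int) + 1) (some x.2)
        (by rw [hs]; simp)
        (by
          rw [PySem.Dict.items_insert_of_not_contains _ _ hcont, hres]
          simp only [List.map_append, List.map_cons, List.map_nil]
          congr 2
          · exact Prod.ext rfl (by rw [hcnt]; omega))
        (by
          right
          refine ⟨x.2, rfl, by rw [hcnt]; omega, ?_, ?_⟩
          · intro p hp'
            rcases List.mem_append.mp hp' with h | h
            · rcases hinv with ⟨hd, _⟩ | ⟨lv, hprev, _, hmin, hub⟩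
              · subst hd; simp at h
              · have hxle : x.2 ≤ lv := hub x (List.mem_cons_self)
                have hneq : x.2 ≠ lv := fun h2 => hne (by rw [h2, hprev])
                exact le_of_lt (lt_of_lt_of_le (lt_of_le_of_ne hxle hneq) (hmin p h))
            · simp at h; rw [h]
          · exact ht')
      rw [← hlen] at hstep
      exact hstep
    · simp only [if_neg hne]
      push Not at hne
      rcases hinv with ⟨hd, hprev⟩ | ⟨lv, hprev, hrank, hmin, hub⟩
      · rw [hprev] at hne; exact absurd hne (by simp)
      · have hlv : lv = x.2 := by
          rw [hprev] at hne
          exact (Option.some_inj.mp hne).symm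
        have hstep := ih (done ++ [x]) (res.insert x.1 rank) rank prev
          (by rw [hs]; simp)
          (by
            rw [PySem.Dict.items_insert_of_not_contains _ _ hcont, hres]
            simp only [List.map_append, List.map_cons, List.map_nil]
            congr 2
            rw [hrank, hlv])
          (by
            right
            refine ⟨lv, hprev, hrank, ?_, ?_⟩
            · intro p hp'
              rcases List.mem_append.mp hp' with h | h
              · exact hmin p h
              · simp at h; rw [h, hlv]
            · intro q hq; exact hub q (List.mem_cons_of_mem _ hq))
        rw [← hlen] at hstep
        exact hstep

-- ===== VERDICT (by name: the statement is the Claim_ definition above) =====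
theorem return_ranking_dict_spec : Claim_equal_return_ranking_dict := by
  intro d _ hpre
  unfold Spec_return_ranking_dict return_ranking_dict return_ranking_dict_alt
  have hp := PySem.List.sorted_pairwise_rev d (fun p => p.2)
  have hn : ((PySem.List.sorted d (fun p => p.2) true).map Prod.fst).Nodup :=
    (((PySem.List.sorted_perm d (fun p => p.2) true).map Prod.fst).nodup_iff).mpr hpre
  have h := rank_fold_items (PySem.List.sorted d (fun p => p.2) true) hp hn
    (PySem.List.sorted d (fun p => p.2) true) [] PySem.Dict.empty 0 none
    (by simp) (by simp [PySem.Dict.empty]) (Or.inl ⟨rfl, rfl⟩)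
  simp only [List.length_nil, Nat.cast_zero] at h
  dsimp only
  rw [h]
  simp only [List.map_map]
  refine List.map_congr_left ?_
  intro p _
  rw [← PySem.List.sum_map_ite_one_zero (fun q => decide (p.2 < q.2))
      (PySem.List.sorted d (fun x => x.2) true)]
  simp only [Function.comp_def, gt_iff_lt, decide_eq_true_eq]
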